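-- pv_equiv track=rewrite | github.com/ggreif/ic | rs/tests/run-system-tests.py | try_extract_arguments
-- ===== SOURCE A (Python) =====
-- from typing import List
-- from typing import Tuple
--
-- def try_extract_arguments(search_args: List[str], separator: str, args: List[str]) -> Tuple[str, ...]:
--     arg_values: List[str] = []
--     for search_arg in search_args:
--         search_result = [search_arg in arg for arg in args]
--         arg_value = ""
--         try:
--             idx = search_result.index(True)
--             _, arg_value = args[idx].split(separator)
--         except ValueError:
--             pass
--         arg_values.append(arg_value)
--     return tuple(arg_values)
-- ===== SOURCE B (Python) =====
-- from typing import List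
-- from typing import Tuple
--
-- def try_extract_arguments(search_args: List[str], separator: str, args: List[str]) -> Tuple[str, ...]:
--     result = [""] * len(search_args)
--     unfilled = list(range(len(search_args)))
--     for arg in args:
--         if not unfilled:
--             break
--         still = []
--         for i in unfilled:
--             if search_args[i] in arg:
--                 parts = arg.split(separator) if separator else []
--                 result[i] = parts[1] if len(parts) == 2 else ""
--             else:
--                 still.append(i)
--         unfilled = still
--     return tuple(result)
-- ===== Notes on version B (the rewrite author's own statement) =====
-- stated objective: alternative
-- what changed: Transposed the loops: instead of scanning all args once per search pattern, B makes a single pass over args maintaining per-pattern result slots and a shrinking list of unfilled pattern indices, breaking out early once every pattern is resolved.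
import Mathlib
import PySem

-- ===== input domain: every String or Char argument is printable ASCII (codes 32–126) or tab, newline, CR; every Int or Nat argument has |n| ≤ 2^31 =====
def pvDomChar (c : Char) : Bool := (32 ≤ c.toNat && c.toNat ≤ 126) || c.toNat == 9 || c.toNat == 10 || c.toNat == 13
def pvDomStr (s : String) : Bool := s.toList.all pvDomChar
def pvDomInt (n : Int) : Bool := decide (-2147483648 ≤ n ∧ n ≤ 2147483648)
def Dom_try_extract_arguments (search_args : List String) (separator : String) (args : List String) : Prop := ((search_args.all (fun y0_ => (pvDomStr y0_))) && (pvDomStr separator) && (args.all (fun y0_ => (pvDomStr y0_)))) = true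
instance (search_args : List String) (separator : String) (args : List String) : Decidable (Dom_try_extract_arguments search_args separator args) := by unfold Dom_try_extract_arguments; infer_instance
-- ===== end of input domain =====

-- B transposes A's loops: one pass over args filling per-pattern slots, with a shrinking
-- list of unfilled pattern indices and an early break (objective: alternative decomposition).

-- ===== PORT A =====
-- per-search_arg body of A's loop: find first containing arg, split it; "" on any ValueError
def pvAVal (separator : String) (args : List String) (search_arg : String) : String :=
  let search_result := args.map (fun arg => PySem.Str.isIn search_arg arg)
  match PySem.List.index? search_result true with
  | none => ""                                   -- .index raised ValueError, caught
  | some idx =>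
      match PySem.Str.split? (args.getD idx "") separator with
      | some [_, v] => v                         -- _, arg_value = args[idx].split(separator)
      | _ => ""                                  -- empty separator or wrong arity: ValueError, caught

def try_extract_arguments (search_args : List String) (separator : String) (args : List String) : List String :=
  search_args.foldl (fun arg_values search_arg => arg_values ++ [pvAVal separator args search_arg]) []

-- ===== PORT B =====
-- value extracted from one arg: parts[1] if splitting gives exactly two parts, else ""
def pvBVal (separator : String) (arg : String) : String :=
  let parts : List String :=
    if separator = "" then [] else (PySem.Str.split? arg separator).getD []
  if parts.length = 2 then parts.getD 1 "" else ""

-- inner loop over the unfilled indices for one arg: returns (result', still-unfilled)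
def pvBStep (search_args : List String) (separator : String) (arg : String)
    (unfilled : List Nat) (result : List String) : List String × List Nat :=
  unfilled.foldl
    (fun acc i =>
      if PySem.Str.isIn (search_args.getD i "") arg then
        (acc.1.set i (pvBVal separator arg), acc.2)
      else
        (acc.1, acc.2 ++ [i]))
    (result, [])

-- outer loop over args, with the early break when nothing is unfilled
def pvBLoop (search_args : List String) (separator : String) :
    List String → List String → List Nat → List String
  | [], result, _ => result
  | arg :: rest, result, unfilled =>
      if unfilled.isEmpty then result
      else
        let p := pvBStep search_args separator arg unfilled result
        pvBLoop search_args separator rest p.1 p.2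

def try_extract_arguments_alt (search_args : List String) (separator : String) (args : List String) : List String :=
  pvBLoop search_args separator args
    (List.replicate search_args.length "") (List.range search_args.length)

-- ===== PRECONDITION & SPEC =====
def Spec_try_extract_arguments (search_args : List String) (separator : String) (args : List String) (out : List String) : Prop := out = try_extract_arguments_alt search_args separator args
instance (search_args : List String) (separator : String) (args : List String) (out : List String) : Decidable (Spec_try_extract_arguments search_args separator args out) := by unfold Spec_try_extract_arguments; infer_instance

-- ===== CLAIM (what is proved, stated in full; the proofs are below) =====
def Claim_equal_try_extract_arguments : Prop := ∀ (search_args : List String) (separator : String) (args : List String), Dom_try_extract_arguments search_args separator args → Spec_try_extract_arguments search_args separator args (try_extract_arguments search_args separator args)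

-- ===== LEMMAS AND PROOFS =====

-- B's per-arg extracted value equals A's split-and-unpack result on that arg
theorem pvBVal_eq (separator arg : String) :
    pvBVal separator arg =
      (match PySem.Str.split? arg separator with
       | some [_, v] => v
       | _ => "") := by
  unfold pvBVal
  by_cases hsep : separator = ""
  · subst hsep
    simp [PySem.Str.split?, PySem.Chars.split?]
  · have hs : (PySem.Str.split? arg separator).isSome := by
      simp [PySem.Str.split?, PySem.Chars.split?]
      intro hh
      exact hsep (by cases separator; simp_all)
    match hps : PySem.Str.split? arg separator with
    | none => rw [hps] at hs; simp at hs
    | some ps =>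
      simp [hsep]
      match ps with
      | [] => simp
      | [a] => simp
      | [a, b] => simp
      | a :: b :: c :: t => simp [List.length]

-- A's per-pattern value, unfolded one arg at a time
theorem pvAVal_nil (separator search_arg : String) : pvAVal separator [] search_arg = "" := by
  simp [pvAVal, PySem.List.index?]

theorem pvAVal_cons (separator arg search_arg : String) (rest : List String) :
    pvAVal separator (arg :: rest) search_arg =
      if PySem.Str.isIn search_arg arg then pvBVal separator arg
      else pvAVal separator rest search_arg := by
  rw [pvBVal_eq]
  unfold pvAVal
  simp only [List.map_cons]
  cases h : PySem.Str.isIn search_arg arg with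
  | true =>
    rw [PySem.List.index?_cons_self, if_pos rfl]
    rfl
  | false =>
    rw [PySem.List.index?_cons_of_ne _ (show (false : Bool) ≠ true by decide), if_neg (by decide)]
    cases PySem.List.index? (List.map (fun a => PySem.Str.isIn search_arg a) rest) true with
    | none => rfl
    | some k => rfl

-- characterisation of the inner fold of pvBStep
theorem pvBStep_fold_spec (search_args : List String) (separator arg : String)
    (unfilled : List Nat) (s0 : List String × List Nat)
    (hlt : forall i, i ∈ unfilled → i < s0.1.length) :
    (unfilled.foldl
      (fun acc i =>
        if PySem.Str.isIn (search_args.getD i "") arg then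
          (acc.1.set i (pvBVal separator arg), acc.2)
        else (acc.1, acc.2 ++ [i])) s0).2
      = s0.2 ++ unfilled.filter (fun i => !(PySem.Str.isIn (search_args.getD i "") arg)) ∧
    (unfilled.foldl
      (fun acc i =>
        if PySem.Str.isIn (search_args.getD i "") arg then
          (acc.1.set i (pvBVal separator arg), acc.2)
        else (acc.1, acc.2 ++ [i])) s0).1.length = s0.1.length ∧
    ∀ p, (unfilled.foldl
      (fun acc i =>
        if PySem.Str.isIn (search_args.getD i "") arg then
          (acc.1.set i (pvBVal separator arg), acc.2)
        else (acc.1, acc.2 ++ [i])) s0).1[p]?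
      = if p ∈ unfilled ∧ PySem.Str.isIn (search_args.getD p "") arg
        then some (pvBVal separator arg) else s0.1[p]? := by
  induction unfilled generalizing s0 with
  | nil => simp
  | cons i u ih =>
    simp only [List.foldl_cons]
    by_cases hm : PySem.Str.isIn (search_args.getD i "") arg = true
    · rw [if_pos hm]
      have hlt' : ∀ j, j ∈ u → j < ((s0.1.set i (pvBVal separator arg), s0.2) : List String × List Nat).1.length := by
        intro j hj
        rw [List.length_set]
        exact hlt j (List.mem_cons_of_mem _ hj)
      obtain ⟨h2, hlen, hp⟩ := ih (s0.1.set i (pvBVal separator arg), s0.2) hlt'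
      have hfi : (!(PySem.Str.isIn (search_args.getD i "") arg)) = false := by rw [hm]; rfl
      refine ⟨?_, ?_, ?_⟩
      · rw [h2, List.filter_cons_of_neg
          (p := fun j => !(PySem.Str.isIn (search_args.getD j "") arg)) (a := i)
          (by intro hc
              rw [show ((fun j => !(PySem.Str.isIn (search_args.getD j "") arg)) i)
                    = (!(PySem.Str.isIn (search_args.getD i "") arg)) from rfl, hfi] at hc
              cases hc)]
      · rw [hlen, List.length_set]
      · intro p
        rw [hp p]
        by_cases hpu : p ∈ u ∧ PySem.Str.isIn (search_args.getD p "") arg = true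
        · rw [if_pos hpu, if_pos ⟨List.mem_cons_of_mem _ hpu.1, hpu.2⟩]
        · rw [if_neg hpu]
          by_cases hpi : p = i
          · subst hpi
            rw [if_pos ⟨List.mem_cons_self, hm⟩]
            exact List.getElem?_set_self (hlt p List.mem_cons_self)
          · have hc : ¬ (p ∈ i :: u ∧ PySem.Str.isIn (search_args.getD p "") arg = true) := by
              intro hc
              rcases List.mem_cons.mp hc.1 with h | h
              · exact hpi h
              · exact hpu ⟨h, hc.2⟩
            rw [if_neg hc]
            exact List.getElem?_set_ne (fun he => hpi he.symm)
    · rw [if_neg hm]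
      have hlt' : ∀ j, j ∈ u → j < ((s0.1, s0.2 ++ [i]) : List String × List Nat).1.length := by
        intro j hj
        exact hlt j (List.mem_cons_of_mem _ hj)
      obtain ⟨h2, hlen, hp⟩ := ih (s0.1, s0.2 ++ [i]) hlt'
      have hfi : (!(PySem.Str.isIn (search_args.getD i "") arg)) = true := by
        cases hin : PySem.Str.isIn (search_args.getD i "") arg
        · rfl
        · exact absurd hin hm
      refine ⟨?_, ?_, ?_⟩
      · rw [h2, List.filter_cons_of_pos
          (p := fun j => !(PySem.Str.isIn (search_args.getD j "") arg)) (a := i)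
          (show ((fun j => !(PySem.Str.isIn (search_args.getD j "") arg)) i) = true from hfi)]
        simp only [List.append_assoc, List.singleton_append]
      · exact hlen
      · intro p
        rw [hp p]
        by_cases hpu : p ∈ u ∧ PySem.Str.isIn (search_args.getD p "") arg = true
        · rw [if_pos hpu, if_pos ⟨List.mem_cons_of_mem _ hpu.1, hpu.2⟩]
        · have hc : ¬ (p ∈ i :: u ∧ PySem.Str.isIn (search_args.getD p "") arg = true) := by
            intro hc
            rcases List.mem_cons.mp hc.1 with h | h
            · exact hm (h ▸ hc.2)
            · exact hpu ⟨h, hc.2⟩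
          rw [if_neg hpu, if_neg hc]

-- main loop invariant: unfilled slots hold "" and end up holding A's values
theorem pvBLoop_spec (search_args : List String) (separator : String) (args : List String)
    (result : List String) (unfilled : List Nat)
    (hlt : ∀ i, i ∈ unfilled → i < result.length)
    (hblank : ∀ p, p ∈ unfilled → result[p]? = some "") :
    (pvBLoop search_args separator args result unfilled).length = result.length ∧
    ∀ p, (pvBLoop search_args separator args result unfilled)[p]?
      = if p ∈ unfilled then some (pvAVal separator args (search_args.getD p ""))
        else result[p]? := by
  induction args generalizing result unfilled with
  | nil =>
    refine ⟨rfl, fun p => ?_⟩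
    simp only [pvBLoop]
    by_cases hp : p ∈ unfilled
    · rw [pvAVal_nil, if_pos hp]
      exact hblank p hp
    · rw [if_neg hp]
  | cons arg rest ih =>
    by_cases hemp : unfilled.isEmpty
    · have hnil : unfilled = [] := List.isEmpty_iff.mp hemp
      subst hnil
      refine ⟨by simp [pvBLoop], fun p => by simp [pvBLoop]⟩
    · have hloop : pvBLoop search_args separator (arg :: rest) result unfilled
          = pvBLoop search_args separator rest
              (pvBStep search_args separator arg unfilled result).1
              (pvBStep search_args separator arg unfilled result).2 := by
        simp [pvBLoop, hemp]
      obtain ⟨h2, hlen, hp⟩ :=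
        pvBStep_fold_spec search_args separator arg unfilled (result, []) hlt
      have hstep2 : (pvBStep search_args separator arg unfilled result).2
          = unfilled.filter (fun i => !(PySem.Str.isIn (search_args.getD i "") arg)) := by
        unfold pvBStep
        rw [h2]
        rfl
      have hstep1len : (pvBStep search_args separator arg unfilled result).1.length = result.length := by
        unfold pvBStep
        exact hlen
      have hstep1 : ∀ p, (pvBStep search_args separator arg unfilled result).1[p]?
          = if p ∈ unfilled ∧ PySem.Str.isIn (search_args.getD p "") arg
            then some (pvBVal separator arg) else result[p]? := by
        unfold pvBStep
        intro p
        rw [hp p]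
      have hlt' : ∀ i, i ∈ (pvBStep search_args separator arg unfilled result).2 →
          i < (pvBStep search_args separator arg unfilled result).1.length := by
        intro i hi
        rw [hstep2] at hi
        rw [hstep1len]
        exact hlt i (List.mem_of_mem_filter hi)
      have hblank' : ∀ p, p ∈ (pvBStep search_args separator arg unfilled result).2 →
          (pvBStep search_args separator arg unfilled result).1[p]? = some "" := by
        intro p hpm
        rw [hstep2] at hpm
        have hmem := List.mem_of_mem_filter hpm
        have hnin : ¬ (PySem.Str.isIn (search_args.getD p "") arg = true) := by
          have := List.of_mem_filter hpm
          simpa using this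
        rw [hstep1 p, if_neg (fun hc => hnin hc.2)]
        exact hblank p hmem
      obtain ⟨ihlen, ihp⟩ := ih (pvBStep search_args separator arg unfilled result).1
        (pvBStep search_args separator arg unfilled result).2 hlt' hblank'
      constructor
      · rw [hloop, ihlen, hstep1len]
      · intro p
        rw [hloop, ihp p, pvAVal_cons]
        by_cases hpm : p ∈ unfilled
        · by_cases hin : PySem.Str.isIn (search_args.getD p "") arg = true
          · have hnot : p ∉ (pvBStep search_args separator arg unfilled result).2 := by
              rw [hstep2]
              intro hc
              exact absurd (List.of_mem_filter hc) (by simpa using hin)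
            rw [if_neg hnot, hstep1 p, if_pos ⟨hpm, hin⟩, if_pos hpm, if_pos hin]
          · have hyes : p ∈ (pvBStep search_args separator arg unfilled result).2 := by
              rw [hstep2]
              exact List.mem_filter.mpr ⟨hpm, by simpa using hin⟩
            rw [if_pos hyes, if_pos hpm, if_neg hin]
        · have hnot : p ∉ (pvBStep search_args separator arg unfilled result).2 := by
            rw [hstep2]
            intro hc
            exact hpm (List.mem_of_mem_filter hc)
          rw [if_neg hnot, hstep1 p, if_neg (fun hc => hpm hc.1), if_neg hpm]

-- ===== VERDICT (by name: the statement is the Claim_ definition above) =====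
theorem try_extract_arguments_spec : Claim_equal_try_extract_arguments := by
  intro search_args separator args _
  unfold Spec_try_extract_arguments
  unfold try_extract_arguments try_extract_arguments_alt
  rw [PySem.List.foldl_append_singleton_eq_map]
  obtain ⟨hlen, hp⟩ := pvBLoop_spec search_args separator args
    (List.replicate search_args.length "") (List.range search_args.length)
    (by intro i hi; simpa using List.mem_range.mp hi)
    (by intro p hp; simp [List.mem_range.mp hp])
  apply List.ext_getElem?
  intro p
  rw [hp p]
  by_cases hlt : p < search_args.length
  · rw [if_pos (List.mem_range.mpr hlt)]
    simp [List.getElem?_eq_getElem hlt, List.getD_eq_getElem?_getD]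
  · rw [if_neg (fun hc => hlt (List.mem_range.mp hc))]
    have hle : search_args.length ≤ p := Nat.le_of_not_lt hlt
    rw [List.getElem?_eq_none (by simpa using hle), List.getElem?_eq_none (by simpa using hle)]
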